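-- pv_equiv track=rewrite | github.com/rrimyyu/OPTIMAL_BP_AI | data_preprocessing.py | generate_bp_columns
-- ===== SOURCE A (Python) =====
-- def generate_bp_columns(intervals):
--     bp_15min_cols = ["Systolic_15min", "Systolic_30min", "Systolic_45min"]
--
--     for i in range(1, 24):
--         bp_15min_cols.append(f"Systolic_{i}h")
--         bp_15min_cols.append(f"Systolic_{i}h_15min")
--         bp_15min_cols.append(f"Systolic_{i}h_30min")
--         bp_15min_cols.append(f"Systolic_{i}h_45min")
--     bp_15min_cols.append("Systolic_24h")
--
--     bp_30min_cols = ["Systolic_30min"]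
--     for i in range(1, 24):
--         bp_30min_cols.append(f"Systolic_{i}h")
--         bp_30min_cols.append(f"Systolic_{i}h_30min")
--     bp_30min_cols.append("Systolic_24h")
--
--     if intervals == 15:
--         return bp_15min_cols
--
--     elif intervals == 30:
--         return bp_30min_cols
-- ===== SOURCE B (Python) =====
-- def _col(m):
--     h, rem = divmod(m, 60)
--     if h == 0:
--         return f"Systolic_{m}min"
--     if rem == 0:
--         return f"Systolic_{h}h"
--     return f"Systolic_{h}h_{rem}min"
--
--
-- def generate_bp_columns(intervals):
--     if intervals == 15:
--         return [_col(m) for m in range(15, 1441, 15)]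
--     if intervals == 30:
--         return [_col(m) for m in range(30, 1441, 30)]
-- ===== Notes on version B (the rewrite author's own statement) =====
-- stated objective: simpler
-- what changed: Replaces the two hand-unrolled per-hour append loops with one helper mapping a minute offset to its column name, swept uniformly over a full day of offsets at the requested granularity.
import Mathlib
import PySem

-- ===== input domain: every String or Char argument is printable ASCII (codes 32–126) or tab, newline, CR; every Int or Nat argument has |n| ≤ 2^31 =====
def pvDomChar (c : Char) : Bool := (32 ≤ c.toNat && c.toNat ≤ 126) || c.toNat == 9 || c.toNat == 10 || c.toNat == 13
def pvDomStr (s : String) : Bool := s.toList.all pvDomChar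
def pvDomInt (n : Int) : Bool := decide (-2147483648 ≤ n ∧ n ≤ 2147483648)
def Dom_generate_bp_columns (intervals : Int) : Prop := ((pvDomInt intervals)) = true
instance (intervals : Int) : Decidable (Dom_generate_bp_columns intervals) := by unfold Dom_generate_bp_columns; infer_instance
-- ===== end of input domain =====

-- B replaces the two hand-unrolled per-hour append loops with one offset-to-name helper mapped over the minute offsets; same return value.


-- ===== PORT A =====
def generate_bp_columns (intervals : Int) : Option (List String) :=
  let bp15 := (PySem.List.pyRange 1 24 1).foldl (fun acc i =>
      acc ++ ["Systolic_" ++ PySem.Int.toStr i ++ "h",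
              "Systolic_" ++ PySem.Int.toStr i ++ "h_15min",
              "Systolic_" ++ PySem.Int.toStr i ++ "h_30min",
              "Systolic_" ++ PySem.Int.toStr i ++ "h_45min"])
    ["Systolic_15min", "Systolic_30min", "Systolic_45min"]
  let bp15 := bp15 ++ ["Systolic_24h"]
  let bp30 := (PySem.List.pyRange 1 24 1).foldl (fun acc i =>
      acc ++ ["Systolic_" ++ PySem.Int.toStr i ++ "h",
              "Systolic_" ++ PySem.Int.toStr i ++ "h_30min"])
    ["Systolic_30min"]
  let bp30 := bp30 ++ ["Systolic_24h"]
  if intervals == 15 then some bp15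
  else if intervals == 30 then some bp30
  else none

-- ===== PORT B =====
-- B: one helper maps a minute offset to its column name; sweep the offsets.
def pvColName (m : Int) : String :=
  let h := PySem.Int.floordiv m 60
  let rem := PySem.Int.mod m 60
  if h == 0 then "Systolic_" ++ PySem.Int.toStr m ++ "min"
  else if rem == 0 then "Systolic_" ++ PySem.Int.toStr h ++ "h"
  else "Systolic_" ++ PySem.Int.toStr h ++ "h_" ++ PySem.Int.toStr rem ++ "min"

def generate_bp_columns_alt (intervals : Int) : Option (List String) :=
  if intervals == 15 then some ((PySem.List.pyRange 15 1441 15).map pvColName)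
  else if intervals == 30 then some ((PySem.List.pyRange 30 1441 30).map pvColName)
  else none

-- ===== PRECONDITION & SPEC =====
def Spec_generate_bp_columns (intervals : Int) (out : Option (List String)) : Prop := out = generate_bp_columns_alt intervals
instance (intervals : Int) (out : Option (List String)) : Decidable (Spec_generate_bp_columns intervals out) := by unfold Spec_generate_bp_columns; infer_instance

-- ===== CLAIM (what is proved, stated in full; the proofs are below) =====
def Claim_equal_generate_bp_columns : Prop := ∀ (intervals : Int), Dom_generate_bp_columns intervals → Spec_generate_bp_columns intervals (generate_bp_columns intervals)

-- ===== LEMMAS AND PROOFS =====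
theorem pv_eq_at_15 : generate_bp_columns 15 = generate_bp_columns_alt 15 := by decide

theorem pv_eq_at_30 : generate_bp_columns 30 = generate_bp_columns_alt 30 := by decide


-- ===== VERDICT (by name: the statement is the Claim_ definition above) =====
theorem generate_bp_columns_spec : Claim_equal_generate_bp_columns := by
  intro intervals _
  unfold Spec_generate_bp_columns
  by_cases h15 : intervals = 15
  · subst h15; exact pv_eq_at_15
  · by_cases h30 : intervals = 30
    · subst h30; exact pv_eq_at_30
    · simp [generate_bp_columns, generate_bp_columns_alt, h15, h30]
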